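-- pv_equiv track=rewrite | github.com/MHP47/AdventOfCode_2021 | day_3.py | part_1
-- ===== SOURCE A (Python) =====
-- def part_1(p_Input):
--     x = p_Input.splitlines()
--     x = [[a[i] for a in x] for i in range(len(x[0]))]
--     gamma = ''
--     epsilon = ''
--     for i in range(len(x)):
--         a = x[i].count('0')
--         b = x[i].count('1')
--         gamma += '0' if a > b else '1'
--         epsilon += '0' if a < b else '1'
--     return int(gamma,2) * int(epsilon,2)
-- ===== SOURCE B (Python) =====
-- def part_1(p_Input):
--     rows = p_Input.splitlines()
--     w = len(rows[0])
--     zeros = [0] * w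
--     ones = [0] * w
--     for row in rows:
--         for i in range(w):
--             c = row[i]
--             if c == '0':
--                 zeros[i] += 1
--             elif c == '1':
--                 ones[i] += 1
--     gamma = ''.join('0' if zeros[i] > ones[i] else '1' for i in range(w))
--     epsilon = ''.join('0' if zeros[i] < ones[i] else '1' for i in range(w))
--     return int(gamma, 2) * int(epsilon, 2)
-- ===== Notes on version B (the rewrite author's own statement) =====
-- stated objective: faster
-- what changed: B replaces A's transpose-then-count-per-column (nested comprehension materializing the column matrix, then .count over each column) by a single row-major pass maintaining per-column zero/one counter arrays, building gamma/epsilon with join comprehensions instead of string concatenation in a loop.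
import Mathlib
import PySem

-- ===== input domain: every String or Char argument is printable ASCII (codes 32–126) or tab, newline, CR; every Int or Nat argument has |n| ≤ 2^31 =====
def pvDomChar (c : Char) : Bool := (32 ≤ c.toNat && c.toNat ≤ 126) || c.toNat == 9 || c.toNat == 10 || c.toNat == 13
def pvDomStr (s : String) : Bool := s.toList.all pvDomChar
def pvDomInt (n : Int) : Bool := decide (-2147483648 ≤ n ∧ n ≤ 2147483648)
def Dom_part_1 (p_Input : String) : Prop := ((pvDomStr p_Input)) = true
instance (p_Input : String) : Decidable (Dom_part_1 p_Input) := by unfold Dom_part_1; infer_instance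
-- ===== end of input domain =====

-- B replaces A's transpose-then-count-per-column by a single row-major pass over per-column
-- zero/one counter arrays (same asymptotic cost; measured constant-factor speedup: no
-- transposed matrix is materialized).

-- ===== PORT A =====
def part_1 (p_Input : String) : Int :=
  let rows := (PySem.Str.splitlines p_Input).map String.toList
  -- x[0] raises IndexError on empty input; Pre_ requires rows ≠ []
  let width := (PySem.List.pyGetD rows 0 []).length
  -- x = [[a[i] for a in x] for i in range(len(x[0]))]; a[i] raises on short rows (Pre_)
  let x := (PySem.List.pyRange 0 (width : Int)).map
    (fun i => rows.map (fun a => PySem.List.pyGetD a i ' '))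
  let ge := (PySem.List.pyRange 0 (x.length : Int)).foldl
    (fun (ge : List Char × List Char) i =>
      let col := PySem.List.pyGetD x i []
      let a := col.count '0'
      let b := col.count '1'
      (ge.1 ++ [if a > b then '0' else '1'], ge.2 ++ [if a < b then '0' else '1']))
    ([], [])
  -- int(gamma,2): raises ValueError only when gamma = '' (width 0), excluded by Pre_
  ((PySem.Int.ofCharsBase? ge.1 2).getD 0) * ((PySem.Int.ofCharsBase? ge.2 2).getD 0)

-- ===== PORT B =====
def part_1_alt (p_Input : String) : Int :=
  let rows := (PySem.Str.splitlines p_Input).map String.toList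
  let w := (PySem.List.pyGetD rows 0 []).length
  let zo := rows.foldl
    (fun (zo : List Int × List Int) row =>
      (PySem.List.pyRange 0 (w : Int)).foldl
        (fun (zo : List Int × List Int) i =>
          let c := PySem.List.pyGetD row i ' '
          if c = '0' then
            (PySem.List.pySetD zo.1 i (PySem.List.pyGetD zo.1 i 0 + 1), zo.2)
          else if c = '1' then
            (zo.1, PySem.List.pySetD zo.2 i (PySem.List.pyGetD zo.2 i 0 + 1))
          else zo)
        zo)
    (List.replicate w (0 : Int), List.replicate w (0 : Int))
  let gamma := (PySem.List.pyRange 0 (w : Int)).map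
    (fun i => if PySem.List.pyGetD zo.1 i 0 > PySem.List.pyGetD zo.2 i 0 then '0' else '1')
  let epsilon := (PySem.List.pyRange 0 (w : Int)).map
    (fun i => if PySem.List.pyGetD zo.1 i 0 < PySem.List.pyGetD zo.2 i 0 then '0' else '1')
  ((PySem.Int.ofCharsBase? gamma 2).getD 0) * ((PySem.Int.ofCharsBase? epsilon 2).getD 0)

-- ===== PRECONDITION & SPEC =====
-- Pre_ excludes exactly the inputs where A raises: empty input (x[0] IndexError), a first
-- line of length 0 (int('',2) ValueError), or a later line shorter than the first (IndexError).
def Pre_part_1 (p_Input : String) : Prop :=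
  let rows := (PySem.Str.splitlines p_Input).map String.toList
  rows ≠ [] ∧ 0 < (rows.headD []).length ∧
    ∀ r ∈ rows, (rows.headD []).length ≤ r.length
instance (p_Input : String) : Decidable (Pre_part_1 p_Input) := by unfold Pre_part_1; infer_instance

def pvWitness_part_1 : String := "01\n10\n11"

def Spec_part_1 (p_Input : String) (out : Int) : Prop := out = part_1_alt p_Input
instance (p_Input : String) (out : Int) : Decidable (Spec_part_1 p_Input out) := by unfold Spec_part_1; infer_instance

-- ===== CLAIM (what is proved, stated in full; the proofs are below) =====
def Claim_equal_part_1 : Prop := ∀ (p_Input : String), Dom_part_1 p_Input → Pre_part_1 p_Input → Spec_part_1 p_Input (part_1 p_Input)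


-- ===== LEMMAS AND PROOFS =====

def pvBStep (row : List Char) (zo : List Int × List Int) (i : Int) : List Int × List Int :=
  let c := PySem.List.pyGetD row i ' '
  if c = '0' then
    (PySem.List.pySetD zo.1 i (PySem.List.pyGetD zo.1 i 0 + 1), zo.2)
  else if c = '1' then
    (zo.1, PySem.List.pySetD zo.2 i (PySem.List.pyGetD zo.2 i 0 + 1))
  else zo

theorem pv_ind_ext (c : Prop) [Decidable c] (j m : Nat) (hj : j ≠ m) :
    (if j < m ∧ c then (1:Int) else 0) = (if j < m + 1 ∧ c then 1 else 0) := by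
  by_cases hc : c <;> by_cases h : j < m <;> simp_all <;> omega

theorem pv_set_getD (xs : List Int) (m j : Nat) (v : Int) (hm : m < xs.length) :
    (PySem.List.pySetD xs (m : Int) v).getD j 0 = if j = m then v else xs.getD j 0 := by
  rw [← PySem.List.pyGetD_natCast (PySem.List.pySetD xs (m : Int) v) j 0,
    PySem.List.pyGetD_pySetD_natCast xs m j v 0 hm, PySem.List.pyGetD_natCast]

theorem pv_inner_fold (row : List Char) (W m : Nat) (hm : m ≤ W)
    (z o : List Int) (hz : z.length = W) (ho : o.length = W) :
    ((PySem.List.pyRange 0 (m : Int)).foldl (pvBStep row) (z, o)).1.length = W ∧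
    ((PySem.List.pyRange 0 (m : Int)).foldl (pvBStep row) (z, o)).2.length = W ∧
    (∀ j : Nat, ((PySem.List.pyRange 0 (m : Int)).foldl (pvBStep row) (z, o)).1.getD j 0 =
      z.getD j 0 + (if j < m ∧ PySem.List.pyGetD row (j : Int) ' ' = '0' then 1 else 0)) ∧
    (∀ j : Nat, ((PySem.List.pyRange 0 (m : Int)).foldl (pvBStep row) (z, o)).2.getD j 0 =
      o.getD j 0 + (if j < m ∧ PySem.List.pyGetD row (j : Int) ' ' = '1' then 1 else 0)) := by
  induction m with
  | zero => simp [hz, ho]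
  | succ m ih =>
    obtain ⟨ih1, ih2, ih3, ih4⟩ := ih (Nat.le_of_succ_le hm)
    have hsplit : PySem.List.pyRange 0 ((m + 1 : Nat) : Int) =
        PySem.List.pyRange 0 (m : Int) ++ [(m : Int)] := by
      push_cast
      exact PySem.List.pyRange_one_succ_right (by positivity)
    rw [hsplit, List.foldl_append]
    set P := (PySem.List.pyRange 0 (m : Int)).foldl (pvBStep row) (z, o) with hP
    simp only [List.foldl_cons, List.foldl_nil]
    unfold pvBStep
    have hm1 : m < W := hm
    by_cases h0 : PySem.List.pyGetD row (m : Int) ' ' = '0'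
    · rw [if_pos h0]
      refine ⟨by simp [ih1], ih2, ?_, ?_⟩
      · intro j
        rw [pv_set_getD P.1 m j _ (by omega)]
        by_cases hj : j = m
        · subst hj
          rw [if_pos rfl, PySem.List.pyGetD_natCast, ih3 j,
            if_neg (fun h => absurd h.1 (lt_irrefl j)), if_pos ⟨Nat.lt_succ_self j, h0⟩]
          ring
        · rw [if_neg hj, ih3 j, pv_ind_ext _ j m hj]
      · intro j
        rw [ih4 j]
        by_cases hj : j = m
        · subst hj
          rw [if_neg (fun h => absurd h.1 (lt_irrefl j)),
            if_neg (fun h => absurd (h0 ▸ h.2) (by decide))]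
        · rw [pv_ind_ext _ j m hj]
    · by_cases h1 : PySem.List.pyGetD row (m : Int) ' ' = '1'
      · rw [if_neg h0, if_pos h1]
        refine ⟨ih1, by simp [ih2], ?_, ?_⟩
        · intro j
          by_cases hj : j = m
          · subst hj
            rw [ih3 j, if_neg (fun h => absurd h.1 (lt_irrefl j)),
              if_neg (fun h => h0 h.2)]
          · rw [ih3 j, pv_ind_ext _ j m hj]
        · intro j
          rw [pv_set_getD P.2 m j _ (by omega)]
          by_cases hj : j = m
          · subst hj
            rw [if_pos rfl, PySem.List.pyGetD_natCast, ih4 j,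
              if_neg (fun h => absurd h.1 (lt_irrefl j)), if_pos ⟨Nat.lt_succ_self j, h1⟩]
            ring
          · rw [if_neg hj, ih4 j, pv_ind_ext _ j m hj]
      · rw [if_neg h0, if_neg h1]
        refine ⟨ih1, ih2, ?_, ?_⟩
        · intro j
          by_cases hj : j = m
          · subst hj
            rw [ih3 j, if_neg (fun h => absurd h.1 (lt_irrefl j)),
              if_neg (fun h => h0 h.2)]
          · rw [ih3 j, pv_ind_ext _ j m hj]
        · intro j
          by_cases hj : j = m
          · subst hj
            rw [ih4 j, if_neg (fun h => absurd h.1 (lt_irrefl j)),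
              if_neg (fun h => h1 h.2)]
          · rw [ih4 j, pv_ind_ext _ j m hj]

def pvCount0 (rows : List (List Char)) (i : Int) : Nat :=
  (rows.map (fun a => PySem.List.pyGetD a i ' ')).count '0'
def pvCount1 (rows : List (List Char)) (i : Int) : Nat :=
  (rows.map (fun a => PySem.List.pyGetD a i ' ')).count '1'

theorem pv_outer_fold (W : Nat) (rows : List (List Char))
    (z o : List Int) (hz : z.length = W) (ho : o.length = W) :
    (rows.foldl (fun zo row => (PySem.List.pyRange 0 (W : Int)).foldl (pvBStep row) zo) (z, o)).1.length = W ∧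
    (rows.foldl (fun zo row => (PySem.List.pyRange 0 (W : Int)).foldl (pvBStep row) zo) (z, o)).2.length = W ∧
    (∀ j : Nat, j < W →
      (rows.foldl (fun zo row => (PySem.List.pyRange 0 (W : Int)).foldl (pvBStep row) zo) (z, o)).1.getD j 0 =
        z.getD j 0 + (pvCount0 rows (j : Int) : Int)) ∧
    (∀ j : Nat, j < W →
      (rows.foldl (fun zo row => (PySem.List.pyRange 0 (W : Int)).foldl (pvBStep row) zo) (z, o)).2.getD j 0 =
        o.getD j 0 + (pvCount1 rows (j : Int) : Int)) := by
  induction rows generalizing z o with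
  | nil => simp [hz, ho, pvCount0, pvCount1]
  | cons r rs ih =>
    simp only [List.foldl_cons]
    obtain ⟨h1, h2, h3, h4⟩ := pv_inner_fold r W W le_rfl z o hz ho
    obtain ⟨g1, g2, g3, g4⟩ :=
      ih ((PySem.List.pyRange 0 (W : Int)).foldl (pvBStep r) (z, o)).1
        ((PySem.List.pyRange 0 (W : Int)).foldl (pvBStep r) (z, o)).2 h1 h2
    have hcc0 : ∀ j : Int, pvCount0 (r :: rs) j =
        pvCount0 rs j + (if PySem.List.pyGetD r j ' ' = '0' then 1 else 0) := by
      intro j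
      by_cases hc : PySem.List.pyGetD r j ' ' = '0' <;>
        simp [pvCount0, hc]
    have hcc1 : ∀ j : Int, pvCount1 (r :: rs) j =
        pvCount1 rs j + (if PySem.List.pyGetD r j ' ' = '1' then 1 else 0) := by
      intro j
      by_cases hc : PySem.List.pyGetD r j ' ' = '1' <;>
        simp [pvCount1, hc]
    refine ⟨by simpa using g1, by simpa using g2, ?_, ?_⟩
    · intro j hj
      have := g3 j hj
      simp only [Prod.mk.eta] at this
      rw [this, h3 j, hcc0 (j : Int)]
      by_cases hc : PySem.List.pyGetD r (j : Int) ' ' = '0'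
      · rw [if_pos ⟨hj, hc⟩, if_pos hc]; push_cast; ring
      · rw [if_neg (fun h => hc h.2), if_neg hc]; push_cast; ring
    · intro j hj
      have := g4 j hj
      simp only [Prod.mk.eta] at this
      rw [this, h4 j, hcc1 (j : Int)]
      by_cases hc : PySem.List.pyGetD r (j : Int) ' ' = '1'
      · rw [if_pos ⟨hj, hc⟩, if_pos hc]; push_cast; ring
      · rw [if_neg (fun h => hc h.2), if_neg hc]; push_cast; ring

theorem pv_foldl_pair_append (f g : Int → Char) (l : List Int) :
    l.foldl (fun (ge : List Char × List Char) i => (ge.1 ++ [f i], ge.2 ++ [g i])) ([], []) =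
      (l.map f, l.map g) := by
  rw [PySem.List.foldl_prod_mk (fun a i => a ++ [f i]) (fun a i => a ++ [g i]),
    PySem.List.foldl_append_singleton_eq_map, PySem.List.foldl_append_singleton_eq_map]
  simp

theorem pv_main (p : String) : part_1 p = part_1_alt p := by
  simp only [part_1, part_1_alt]
  set rows := (PySem.Str.splitlines p).map String.toList with hrows
  set W := (PySem.List.pyGetD rows 0 []).length with hW
  rw [pv_foldl_pair_append]
  have hfun : (fun (zo : List Int × List Int) row =>
      (PySem.List.pyRange 0 (W : Int)).foldl
        (fun (zo : List Int × List Int) i =>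
          if PySem.List.pyGetD row i ' ' = '0' then
            (PySem.List.pySetD zo.1 i (PySem.List.pyGetD zo.1 i 0 + 1), zo.2)
          else if PySem.List.pyGetD row i ' ' = '1' then
            (zo.1, PySem.List.pySetD zo.2 i (PySem.List.pyGetD zo.2 i 0 + 1))
          else zo) zo)
      = (fun (zo : List Int × List Int) row =>
          (PySem.List.pyRange 0 (W : Int)).foldl (pvBStep row) zo) := rfl
  rw [hfun]
  set Z := rows.foldl (fun (zo : List Int × List Int) row =>
      (PySem.List.pyRange 0 (W : Int)).foldl (pvBStep row) zo)
      (List.replicate W 0, List.replicate W 0) with hZ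
  obtain ⟨L1, L2, H0, H1⟩ := pv_outer_fold W rows (List.replicate W 0) (List.replicate W 0)
    (List.length_replicate) (List.length_replicate)
  rw [← hZ] at L1 L2 H0 H1
  have hlen : ((PySem.List.pyRange 0 (W : Int)).map
      (fun i => rows.map (fun a => PySem.List.pyGetD a i ' '))).length = W := by
    simp [PySem.List.length_pyRange_one]
  rw [hlen]
  have hcol : ∀ i ∈ PySem.List.pyRange 0 (W : Int),
      PySem.List.pyGetD ((PySem.List.pyRange 0 (W : Int)).map
        (fun i => rows.map (fun a => PySem.List.pyGetD a i ' '))) i []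
      = rows.map (fun a => PySem.List.pyGetD a i ' ') := by
    intro i hi
    rw [PySem.List.mem_pyRange_one] at hi
    exact PySem.List.pyGetD_map_pyRange_of_nonneg _ _ _ _ hi.1 hi.2
  have hz0 : ∀ i ∈ PySem.List.pyRange 0 (W : Int),
      PySem.List.pyGetD Z.1 i 0 = (pvCount0 rows i : Int) := by
    intro i hi
    rw [PySem.List.mem_pyRange_one] at hi
    lift i to ℕ using hi.1 with k
    rw [PySem.List.pyGetD_natCast, H0 k (by exact_mod_cast hi.2)]
    simp
  have hz1 : ∀ i ∈ PySem.List.pyRange 0 (W : Int),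
      PySem.List.pyGetD Z.2 i 0 = (pvCount1 rows i : Int) := by
    intro i hi
    rw [PySem.List.mem_pyRange_one] at hi
    lift i to ℕ using hi.1 with k
    rw [PySem.List.pyGetD_natCast, H1 k (by exact_mod_cast hi.2)]
    simp
  have hg : (PySem.List.pyRange 0 (W : Int)).map
      (fun i => if List.count '0' (PySem.List.pyGetD ((PySem.List.pyRange 0 (W : Int)).map
          (fun i => rows.map (fun a => PySem.List.pyGetD a i ' '))) i []) >
        List.count '1' (PySem.List.pyGetD ((PySem.List.pyRange 0 (W : Int)).map
          (fun i => rows.map (fun a => PySem.List.pyGetD a i ' '))) i []) then '0' else '1')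
      = (PySem.List.pyRange 0 (W : Int)).map
      (fun i => if PySem.List.pyGetD Z.1 i 0 > PySem.List.pyGetD Z.2 i 0 then '0' else '1') := by
    refine List.map_congr_left (fun i hi => ?_)
    rw [hcol i hi, hz0 i hi, hz1 i hi]
    simp [pvCount0, pvCount1, Nat.cast_lt]
  have he : (PySem.List.pyRange 0 (W : Int)).map
      (fun i => if List.count '0' (PySem.List.pyGetD ((PySem.List.pyRange 0 (W : Int)).map
          (fun i => rows.map (fun a => PySem.List.pyGetD a i ' '))) i []) <
        List.count '1' (PySem.List.pyGetD ((PySem.List.pyRange 0 (W : Int)).map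
          (fun i => rows.map (fun a => PySem.List.pyGetD a i ' '))) i []) then '0' else '1')
      = (PySem.List.pyRange 0 (W : Int)).map
      (fun i => if PySem.List.pyGetD Z.1 i 0 < PySem.List.pyGetD Z.2 i 0 then '0' else '1') := by
    refine List.map_congr_left (fun i hi => ?_)
    rw [hcol i hi, hz0 i hi, hz1 i hi]
    simp [pvCount0, pvCount1, Nat.cast_lt]
  rw [hg, he]

-- ===== VERDICT (by name: the statement is the Claim_ definition above) =====
theorem part_1_spec : Claim_equal_part_1 := by
  intro p _ _
  unfold Spec_part_1
  exact pv_main p
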